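-- pv_equiv track=rewrite | github.com/anamikayadav946/INFYTQ-ANS | Intro_to_Python/Basics_python_assignment/Assignment13.py | generate_leapyear
-- ===== SOURCE A (Python) =====
-- def generate_leapyear(year):
--     count=0
--     leap_year=[]
--     while count<15:
--         if year%4==0:
--             count=count+1
--             leap_year.append(year)
--         year=year+1
--     return (leap_year)
-- ===== SOURCE B (Python) =====
-- def generate_leapyear(year):
--     start = year + (-year) % 4
--     return [start + 4 * i for i in range(15)]
-- ===== Notes on version B (the rewrite author's own statement) =====
-- stated objective: simpler
-- what changed: Replaces the year-by-year scan with arithmetic: jump directly to the first multiple of 4 at or above the input and emit the 15 multiples by a closed-form comprehension.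
import Mathlib
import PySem

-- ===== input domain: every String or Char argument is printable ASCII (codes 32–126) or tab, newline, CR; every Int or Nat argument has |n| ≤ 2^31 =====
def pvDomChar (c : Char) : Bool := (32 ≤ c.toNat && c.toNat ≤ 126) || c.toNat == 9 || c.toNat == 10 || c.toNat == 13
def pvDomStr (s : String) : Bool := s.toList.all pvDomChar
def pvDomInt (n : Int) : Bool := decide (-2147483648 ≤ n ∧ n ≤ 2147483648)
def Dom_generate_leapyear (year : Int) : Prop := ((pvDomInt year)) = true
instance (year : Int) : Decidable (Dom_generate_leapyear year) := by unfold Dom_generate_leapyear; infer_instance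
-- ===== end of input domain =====

-- B replaces A's year-by-year scan with arithmetic: it jumps to the first multiple
-- of 4 at or above the input and lists the 15 multiples directly (simpler).


-- ===== PORT A =====
-- A's while loop, made total by a fuel argument; 60 steps always suffice to collect
-- the 15 multiples of 4 (at most 3 initial skips + 57 scanned years), proved below.
def leapLoopA (fuel : Nat) (count year : Int) (acc : List Int) : List Int :=
  match fuel with
  | 0 => acc
  | fuel + 1 =>
    if count < 15 then
      if year % 4 == 0 then leapLoopA fuel (count + 1) (year + 1) (acc ++ [year])
      else leapLoopA fuel count (year + 1) acc
    else acc

def generate_leapyear (year : Int) : List Int := leapLoopA 60 0 year []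

-- ===== PORT B =====
def generate_leapyear_alt (year : Int) : List Int :=
  let start := year + (-year) % 4
  (PySem.List.pyRange 0 15 1).map (fun i => start + 4 * i)

-- ===== PRECONDITION & SPEC =====
def Spec_generate_leapyear (year : Int) (out : List Int) : Prop := out = generate_leapyear_alt year
instance (year : Int) (out : List Int) : Decidable (Spec_generate_leapyear year out) := by unfold Spec_generate_leapyear; infer_instance

-- ===== CLAIM (what is proved, stated in full; the proofs are below) =====
def Claim_equal_generate_leapyear : Prop := ∀ (year : Int), Dom_generate_leapyear year → Spec_generate_leapyear year (generate_leapyear year)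

-- ===== LEMMAS AND PROOFS =====

-- once count has reached 15 the loop returns the accumulator whatever the fuel
theorem leapLoopA_done (f : Nat) (count year : Int) (acc : List Int) (h : ¬ count < 15) :
    leapLoopA f count year acc = acc := by
  cases f with
  | zero => rfl
  | succ g => simp [leapLoopA, h]

-- one non-leap step of A's loop only advances the year (and costs one fuel)
theorem leapLoopA_step (f : Nat) (count year : Int) (acc : List Int) (h : year % 4 ≠ 0) :
    leapLoopA (f + 1) count year acc = leapLoopA f count (year + 1) acc := by
  by_cases hc : count < 15
  · simp [leapLoopA, hc, h]
  · rw [leapLoopA_done _ _ _ _ hc, leapLoopA_done _ _ _ _ hc]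

-- on a multiple of 4, with enough fuel, A's loop produces the arithmetic progression
theorem leapLoopA_closed (n : ℕ) : ∀ (f : ℕ) (count year : Int) (acc : List Int),
    4 * n ≤ f + 3 → count = 15 - (n : Int) → year % 4 = 0 →
    leapLoopA f count year acc
      = acc ++ (List.range n).map (fun (i : ℕ) => year + 4 * (i : Int)) := by
  induction n with
  | zero =>
    intro f count year acc _ hcount _
    simp [leapLoopA_done f count year acc (by omega)]
  | succ m ih =>
    intro f count year acc hf hcount hy
    have hc : count < 15 := by omega
    obtain ⟨g, rfl⟩ : ∃ g, f = g + 1 := ⟨f - 1, by omega⟩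
    rw [leapLoopA]
    simp only [hc, if_true, hy, beq_self_eq_true]
    have hm : (List.range (m + 1)).map (fun (i : ℕ) => year + 4 * (i : Int))
        = year :: (List.range m).map (fun (i : ℕ) => (year + 1 + 1 + 1 + 1) + 4 * (i : Int)) := by
      rw [List.range_succ_eq_map]
      simp only [List.map_cons, List.map_map]
      congr 1
      · norm_num
      · apply List.map_congr_left
        intro i _
        simp only [Function.comp]
        push_cast
        ring
    by_cases hm0 : m = 0
    · subst hm0
      rw [leapLoopA_done g (count + 1) (year + 1) _ (by omega), hm]
      simp
    · obtain ⟨g', rfl⟩ : ∃ g', g = g' + 1 + 1 + 1 := ⟨g - 3, by omega⟩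
      rw [leapLoopA_step _ _ _ _ (by omega : (year + 1) % 4 ≠ 0),
          leapLoopA_step _ _ _ _ (by omega : (year + 1 + 1) % 4 ≠ 0),
          leapLoopA_step _ _ _ _ (by omega : (year + 1 + 1 + 1) % 4 ≠ 0)]
      rw [ih g' (count + 1) (year + 1 + 1 + 1 + 1) _ (by omega) (by omega) (by omega)]
      rw [hm]
      simp

-- A's loop may be started at the next multiple of 4 instead, spending the skipped fuel
theorem leapLoopA_to_multiple (year : Int) :
    leapLoopA 60 0 year [] = leapLoopA (60 - ((-year) % 4).toNat) 0 (year + (-year) % 4) [] := by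
  have h : year % 4 = 0 ∨ year % 4 = 1 ∨ year % 4 = 2 ∨ year % 4 = 3 := by omega
  rcases h with h | h | h | h
  · have hr : (-year) % 4 = 0 := by omega
    rw [hr]; norm_num
  · have hr : (-year) % 4 = 3 := by omega
    rw [hr, show (60 : Nat) - Int.toNat 3 = 57 from by decide,
        show (60 : Nat) = 57 + 1 + 1 + 1 from rfl]
    rw [leapLoopA_step _ _ _ _ (by omega : year % 4 ≠ 0),
        leapLoopA_step _ _ _ _ (by omega : (year + 1) % 4 ≠ 0),
        leapLoopA_step _ _ _ _ (by omega : (year + 1 + 1) % 4 ≠ 0)]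
    ring_nf
  · have hr : (-year) % 4 = 2 := by omega
    rw [hr, show (60 : Nat) - Int.toNat 2 = 58 from by decide,
        show (60 : Nat) = 58 + 1 + 1 from rfl]
    rw [leapLoopA_step _ _ _ _ (by omega : year % 4 ≠ 0),
        leapLoopA_step _ _ _ _ (by omega : (year + 1) % 4 ≠ 0)]
    ring_nf
  · have hr : (-year) % 4 = 1 := by omega
    rw [hr, show (60 : Nat) - Int.toNat 1 = 59 from by decide,
        show (60 : Nat) = 59 + 1 from rfl]
    rw [leapLoopA_step _ _ _ _ (by omega : year % 4 ≠ 0)]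

-- ===== VERDICT (by name: the statement is the Claim_ definition above) =====
theorem generate_leapyear_spec : Claim_equal_generate_leapyear := by
  intro year _
  unfold Spec_generate_leapyear generate_leapyear generate_leapyear_alt
  rw [leapLoopA_to_multiple]
  rw [leapLoopA_closed 15 (60 - ((-year) % 4).toNat) 0 (year + (-year) % 4) []
        (by omega) (by omega) (by omega)]
  rw [PySem.List.pyRange_one]
  simp [List.map_map, Function.comp]
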